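-- pv_equiv track=rewrite | github.com/AdamOtto/Daily-Challenges | Challenge1204.py | Solution
-- ===== SOURCE A (Python) =====
-- def Solution(ar):
--     l = len(ar)
--     largest = max(ar)
--     denomFound = True
--     for i in reversed(range(largest)):
--         denomFound = True
--         for j in range(l):
--             if ar[j] % i != 0:
--                 denomFound = False
--                 break
--         if denomFound:
--             return i
--     return False
-- ===== SOURCE B (Python) =====
-- def Solution(ar):
--     m = max(ar)
--     # gcd of all elements via Euclid
--     g = 0
--     for x in ar:
--         a, b = g, abs(x)
--         while b:
--             a, b = b, a % b
--         g = a
--     if g < m: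
--         return g
--     # g == m: every element is a multiple of m; answer = largest proper divisor of m
--     p = 2
--     while p * p <= m:
--         if m % p == 0:
--             return m // p
--         p += 1
--     return 1
-- ===== Notes on version B (the rewrite author's own statement) =====
-- stated objective: faster
-- what changed: A counts down from max(ar)-1 testing every candidate against all elements (O(max*n)); B computes the gcd of all elements with Euclid's algorithm and, when the gcd equals the max, finds the largest proper divisor of max by trial division up to sqrt(max).
-- outside the precondition, e.g. on Solution([0, -4]): A returns False, B returns 1; on Solution([-2, -6]): A returns False, B returns 1
import Mathlib
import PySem

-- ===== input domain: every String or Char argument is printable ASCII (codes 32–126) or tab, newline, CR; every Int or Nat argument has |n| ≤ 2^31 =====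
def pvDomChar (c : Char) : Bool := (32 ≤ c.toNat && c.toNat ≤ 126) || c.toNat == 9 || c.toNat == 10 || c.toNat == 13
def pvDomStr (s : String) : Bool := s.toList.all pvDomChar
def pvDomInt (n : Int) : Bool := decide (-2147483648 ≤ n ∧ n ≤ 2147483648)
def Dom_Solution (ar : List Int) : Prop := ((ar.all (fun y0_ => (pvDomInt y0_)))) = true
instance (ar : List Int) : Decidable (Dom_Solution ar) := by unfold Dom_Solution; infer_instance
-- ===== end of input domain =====

-- B replaces A's countdown scan over all integers below max(ar) by a gcd fold plus trial division;
-- return-value equivalence proved on Pre_ (some element > 1; elsewhere A raises or returns the bool False).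

-- ===== PORT A =====
-- inner 'for j in range(l): if ar[j] % i != 0: denomFound = False; break' = short-circuit all over the elements
def solInner (ar : List Int) (i : Int) : Bool :=
  ar.all (fun x => PySem.Int.mod x i == 0)

-- outer 'for i in reversed(range(largest)): … return i'; the fall-through 'return False' is 0 here (excluded by Pre_)
def solOuter (ar : List Int) : List Int → Int
  | [] => 0
  | i :: rest => if solInner ar i then i else solOuter ar rest

def Solution (ar : List Int) : Int :=
  let largest := (PySem.List.max? ar (fun y => y)).getD 0
  solOuter ar (PySem.List.pyRange 0 largest 1).reverse

-- ===== PORT B =====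
-- 'while b: a, b = b, a % b' (fuel only makes the loop total; b strictly decreases, so fuel = b suffices)
def euclidF : Nat → Nat → Nat → Nat
  | _, a, 0 => a
  | 0, a, _ => a
  | fuel + 1, a, b => euclidF fuel b (a % b)

def euclid (a b : Nat) : Nat := euclidF b a b

-- 'p = 2; while p * p <= m: if m % p == 0: return m // p; p += 1' then 'return 1' (fuel m.natAbs bounds the while)
def trialDiv (m : Int) : Int → Nat → Int
  | _, 0 => 1
  | p, fuel + 1 =>
    if p * p ≤ m then
      (if PySem.Int.mod m p == 0 then PySem.Int.floordiv m p else trialDiv m (p + 1) fuel)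
    else 1

def Solution_alt (ar : List Int) : Int :=
  let m := (PySem.List.max? ar (fun y => y)).getD 0
  let g := ar.foldl (fun (g : Int) x => ((euclid g.natAbs x.natAbs : Nat) : Int)) 0
  if g < m then g else trialDiv m 2 m.natAbs

-- ===== PRECONDITION & SPEC =====
-- Pre_ excludes the empty list and lists with max(ar) == 1 (A raises ValueError resp. ZeroDivisionError there)
-- and lists with max(ar) <= 0, on which A falls through and returns the bool False, not an int.
def Pre_Solution (ar : List Int) : Prop := ∃ x ∈ ar, 1 < x
instance (ar : List Int) : Decidable (Pre_Solution ar) := by unfold Pre_Solution; infer_instance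
def pvWitness_Solution : List Int := [4, 6]

def Spec_Solution (ar : List Int) (out : Int) : Prop := out = Solution_alt ar
instance (ar : List Int) (out : Int) : Decidable (Spec_Solution ar out) := by unfold Spec_Solution; infer_instance

-- ===== CLAIM (what is proved, stated in full; the proofs are below) =====
def Claim_equal_Solution : Prop := ∀ (ar : List Int), Dom_Solution ar → Pre_Solution ar → Spec_Solution ar (Solution ar)

-- ===== LEMMAS AND PROOFS =====

theorem euclidF_eq_gcd : ∀ (fuel a b : Nat), b ≤ fuel → euclidF fuel a b = Nat.gcd a b := by
  intro fuel
  induction fuel with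
  | zero =>
    intro a b hb
    interval_cases b
    simp [euclidF]
  | succ f ih =>
    intro a b hb
    match b with
    | 0 => simp [euclidF]
    | c + 1 =>
      have h1 : a % (c + 1) ≤ f := by
        have := Nat.mod_lt a (show 0 < c + 1 by omega)
        omega
      show euclidF f (c + 1) (a % (c + 1)) = Nat.gcd a (c + 1)
      rw [ih (c + 1) (a % (c + 1)) h1]
      conv_rhs => rw [Nat.gcd_comm, Nat.gcd_rec]
      exact Nat.gcd_comm _ _

theorem euclid_eq_gcd (a b : Nat) : euclid a b = Nat.gcd a b :=
  euclidF_eq_gcd b a b le_rfl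

-- the gcd fold over natAbs, with the accumulator exposed
theorem gfold_eq (ar : List Int) (k : Nat) :
    ar.foldl (fun (g : Int) x => ((euclid g.natAbs x.natAbs : Nat) : Int)) (k : Int)
      = ((ar.foldl (fun g x => Nat.gcd g x.natAbs) k : Nat) : Int) := by
  simp only [euclid_eq_gcd]
  induction ar generalizing k with
  | nil => rfl
  | cons x t ih =>
    simp only [List.foldl_cons, Int.natAbs_natCast]
    exact ih (Nat.gcd k x.natAbs)

theorem dvd_gfold_iff (ar : List Int) (k d : Nat) :
    d ∣ ar.foldl (fun g x => Nat.gcd g x.natAbs) k ↔ d ∣ k ∧ ∀ x ∈ ar, (d : Int) ∣ x := by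
  induction ar generalizing k with
  | nil => simp
  | cons x t ih =>
    simp only [List.foldl_cons, ih, Nat.dvd_gcd_iff, List.mem_cons]
    constructor
    · rintro ⟨⟨hk, hx⟩, ht⟩
      refine ⟨hk, ?_⟩
      rintro y (rfl | hy)
      · exact Int.dvd_natAbs.mp (Int.natCast_dvd_natCast.mpr hx)
      · exact ht y hy
    · rintro ⟨hk, hall⟩
      exact ⟨⟨hk, Int.natCast_dvd_natCast.mp (Int.dvd_natAbs.mpr (hall x (Or.inl rfl)))⟩,
             fun y hy => hall y (Or.inr hy)⟩

theorem solInner_iff (ar : List Int) (i : Int) :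
    solInner ar i = true ↔ ∀ x ∈ ar, i ∣ x := by
  simp [solInner, PySem.Int.mod_eq_zero_iff_dvd]

-- the descending scan returns the greatest qualifying value
theorem solOuter_scan (ar : List Int) (n d : Nat) (hd : d < n)
    (hQ : solInner ar (d : Int) = true)
    (hmax : ∀ k : Nat, d < k → k < n → solInner ar (k : Int) = false) :
    solOuter ar (((List.range n).map (fun k : Nat => (k : Int))).reverse) = (d : Int) := by
  induction n with
  | zero => omega
  | succ n ih =>
    rw [List.range_succ, List.map_append, List.reverse_append]
    simp only [List.map_cons, List.map_nil, List.reverse_cons, List.reverse_nil,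
      List.nil_append, List.cons_append, solOuter]
    rcases Nat.lt_or_ge d n with h | h
    · rw [hmax n h (by omega)]
      exact ih h (fun k hk1 hk2 => hmax k hk1 (by omega))
    · have : d = n := by omega
      subst this
      simp [hQ]

theorem trial_none (m : Int) (hnd : ∀ q : Int, 2 ≤ q → q * q ≤ m → ¬ q ∣ m) :
    ∀ (fuel : Nat) (p : Int), 2 ≤ p → trialDiv m p fuel = 1 := by
  intro fuel
  induction fuel with
  | zero => intro p _; rfl
  | succ f ih =>
    intro p hp
    rw [trialDiv]
    split_ifs with h1 h2
    · simp only [beq_iff_eq, PySem.Int.mod_eq_zero_iff_dvd] at h2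
      exact absurd h2 (hnd p hp h1)
    · exact ih (p + 1) (by omega)
    · rfl

theorem trial_some (m p0 : Int) (hdvd : p0 ∣ m)
    (hmin : ∀ q : Int, 2 ≤ q → q ∣ m → p0 ≤ q) (hsq : p0 * p0 ≤ m) :
    ∀ (fuel : Nat) (p : Int), 2 ≤ p → p ≤ p0 → p0 - p < fuel →
      trialDiv m p fuel = PySem.Int.floordiv m p0 := by
  intro fuel
  induction fuel with
  | zero => intro p _ hp2 hf; omega
  | succ f ih =>
    intro p hp hp2 hf
    have hpp : p * p ≤ m := le_trans (by nlinarith) hsq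
    rw [trialDiv, if_pos hpp]
    split_ifs with h2
    · simp only [beq_iff_eq, PySem.Int.mod_eq_zero_iff_dvd] at h2
      have := hmin p hp h2
      have hpeq : p = p0 := le_antisymm hp2 this
      rw [hpeq]
    · rcases eq_or_lt_of_le hp2 with rfl | hlt
      · simp only [beq_iff_eq, PySem.Int.mod_eq_zero_iff_dvd] at h2
        exact absurd hdvd h2
      · exact ih (p + 1) (by omega) (by omega) (by omega)

theorem two_le_div {M k : Nat} (hd : k ∣ M) (hk : k < M) (hM : 0 < M) : 2 ≤ M / k := by
  have hk0 : 0 < k := Nat.pos_of_dvd_of_pos hd hM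
  have hmul : k * (M / k) = M := Nat.mul_div_cancel' hd
  by_contra h
  rw [not_le] at h
  have : M / k ≤ 1 := by omega
  nlinarith

-- ===== VERDICT (by name: the statement is the Claim_ definition above) =====
theorem Solution_spec : Claim_equal_Solution := by
  intro ar _ hpre
  unfold Spec_Solution
  obtain ⟨x0, hx0, hx0gt⟩ := hpre
  have hne : ar ≠ [] := by rintro rfl; simp at hx0
  cases hmax : PySem.List.max? ar (fun y => y) with
  | none => exact absurd ((PySem.List.max?_eq_none_iff ar _).mp hmax) hne
  | some m =>
  have hmem : m ∈ ar := PySem.List.max?_mem hmax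
  have hub : ∀ y ∈ ar, y ≤ m := PySem.List.max?_isMax hmax
  have hm2 : 2 ≤ m := le_trans (by omega) (hub x0 hx0)
  -- m = ↑M
  obtain ⟨M, rfl⟩ : ∃ M : Nat, m = (M : Int) := ⟨m.toNat, (Int.toNat_of_nonneg (by omega)).symm⟩
  have hM2 : 2 ≤ M := by exact_mod_cast hm2
  -- the Nat gcd of the list
  set G : Nat := ar.foldl (fun g x => Nat.gcd g x.natAbs) 0 with hG
  have hdvdG : ∀ d : Nat, d ∣ G ↔ ∀ x ∈ ar, (d : Int) ∣ x := by
    intro d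
    rw [hG, dvd_gfold_iff]
    simp
  have hGdvd : ∀ x ∈ ar, (G : Int) ∣ x := (hdvdG G).mp dvd_rfl
  have hGdvdM : G ∣ M := by
    have := hGdvd _ hmem
    exact_mod_cast this
  have hGpos : 0 < G := by
    rcases Nat.eq_zero_or_pos G with h0 | h
    · exfalso; rw [h0] at hGdvdM; omega
    · exact h
  have hGle : G ≤ M := Nat.le_of_dvd (by omega) hGdvdM
  -- evaluate both sides to the scan / the gcd form
  have hA : Solution ar = solOuter ar (((List.range M).map (fun k : Nat => (k : Int))).reverse) := by
    simp only [Solution, hmax, Option.getD_some, PySem.List.pyRange_zero_nat]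
  have hBg : ar.foldl (fun (g : Int) x => ((euclid g.natAbs x.natAbs : Nat) : Int)) 0 = (G : Int) := by
    have := gfold_eq ar 0
    simpa using this
  have hB : Solution_alt ar = if (G : Int) < (M : Int) then (G : Int) else trialDiv (M : Int) 2 M := by
    simp only [Solution_alt, hmax, Option.getD_some, hBg, Int.natAbs_natCast]
  rcases Nat.lt_or_ge G M with hGM | hGM
  -- case 1: gcd < max, both return the gcd
  · rw [hB, if_pos (by exact_mod_cast hGM), hA]
    apply solOuter_scan ar M G hGM ((solInner_iff ar _).mpr hGdvd)
    intro k hk1 hk2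
    rw [← Bool.not_eq_true]
    intro hc
    have hkG : k ∣ G := (hdvdG k).mpr ((solInner_iff ar _).mp hc)
    exact absurd (Nat.le_of_dvd hGpos hkG) (by omega)
  -- case 2: gcd = max; every element is a multiple of M
  · have hGeq : G = M := le_antisymm hGle hGM
    subst hGeq
    rw [hB, if_neg (by omega), hA]
    -- least divisor ≥ 2 of G
    have hself : 2 ≤ G ∧ G ∣ G := ⟨hM2, dvd_rfl⟩
    set p0 : Nat := Nat.find (⟨G, hself⟩ : ∃ q, 2 ≤ q ∧ q ∣ G) with hp0def
    obtain ⟨hp02, hp0dvd⟩ := Nat.find_spec (⟨G, hself⟩ : ∃ q, 2 ≤ q ∧ q ∣ G)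
    rw [← hp0def] at hp02 hp0dvd
    have hp0min : ∀ q : Nat, 2 ≤ q → q ∣ G → p0 ≤ q := fun q h1 h2 =>
      Nat.find_min' _ ⟨h1, h2⟩
    have hp0le : p0 ≤ G := hp0min G hM2 dvd_rfl
    -- any qualifying k < G divides G
    have hfalse : ∀ k : Nat, 1 < k → k < G → ¬ k ∣ G → solInner ar (k : Int) = false := by
      intro k hk1 hk2 hnd
      rw [← Bool.not_eq_true]
      intro hc
      exact hnd ((hdvdG k).mpr ((solInner_iff ar _).mp hc))
    rcases eq_or_lt_of_le hp0le with hpG | hpG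
    -- case 2a: G has no proper divisor > 1 (prime): both return 1
    · have hnd : ∀ q : Int, 2 ≤ q → q * q ≤ (G : Int) → ¬ q ∣ (G : Int) := by
        intro q hq hqq hqdvd
        have hq0 : q = ((q.toNat : Nat) : Int) := by omega
        have hqd : q.toNat ∣ G := by
          rw [hq0] at hqdvd
          exact_mod_cast hqdvd
        have := hp0min q.toNat (by omega) hqd
        have hqG : (G : Int) ≤ q := by omega
        nlinarith
      rw [trial_none (G : Int) hnd G 2 (by norm_num)]
      have h1 : solInner ar ((1 : Nat) : Int) = true := by
        rw [solInner_iff]; intro x _; exact one_dvd x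
      have hsc := solOuter_scan ar G 1 (by omega) h1 ?_
      · exact_mod_cast hsc
      · intro k hk1 hk2
        apply hfalse k hk1 hk2
        intro hd
        have := hp0min k (by omega) hd
        omega
    -- case 2b: p0 is a proper divisor; both return G / p0
    · have hdivdvd : G / p0 ∣ G := Nat.div_dvd_of_dvd hp0dvd
      have hdiv2 : 2 ≤ G / p0 := two_le_div hp0dvd hpG (by omega)
      have hp0sq : p0 * p0 ≤ G := by
        have h1 : p0 ≤ G / p0 := hp0min _ hdiv2 hdivdvd
        calc p0 * p0 ≤ p0 * (G / p0) := Nat.mul_le_mul_left _ h1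
          _ = G := Nat.mul_div_cancel' hp0dvd
      have htr : trialDiv ((G : Nat) : Int) 2 G = PySem.Int.floordiv (G : Int) (p0 : Int) := by
        apply trial_some
        · exact_mod_cast hp0dvd
        · intro q hq hqdvd
          have hq0 : q = ((q.toNat : Nat) : Int) := by omega
          have hqd : q.toNat ∣ G := by
            rw [hq0] at hqdvd
            exact_mod_cast hqdvd
          have := hp0min q.toNat (by omega) hqd
          omega
        · exact_mod_cast hp0sq
        · norm_num
        · exact_mod_cast hp02
        · omega
      rw [htr, PySem.Int.floordiv_natCast]
      have hdlt : G / p0 < G := Nat.div_lt_self (by omega) (by omega)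
      apply solOuter_scan ar G (G / p0) hdlt
      · rw [solInner_iff]
        intro x hx
        exact dvd_trans (by exact_mod_cast hdivdvd) (hGdvd x hx)
      · intro k hk1 hk2
        rw [← Bool.not_eq_true]
        intro hc
        have hkG : k ∣ G := (hdvdG k).mpr ((solInner_iff ar _).mp hc)
        -- k is a proper divisor of G larger than G / p0: impossible
        have hk0 : 0 < k := by omega
        have hGk2 : 2 ≤ G / k := two_le_div hkG hk2 (by omega)
        have hGkdvd : G / k ∣ G := Nat.div_dvd_of_dvd hkG
        have hp0Gk : p0 ≤ G / k := hp0min _ hGk2 hGkdvd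
        have hkk : G / (G / k) = k := Nat.div_div_self hkG (by omega)
        have : G / (G / k) ≤ G / p0 := Nat.div_le_div_left hp0Gk (by omega)
        omega
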